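-- pv_equiv track=rewrite | github.com/jeremiah-c-leary/vhdl-style-guide | vsg/vhdlFile/extract/get_tokens_bounded_by_unless_between.py | filter_token_pairs
-- ===== SOURCE A (Python) =====
-- def filter_token_pairs(lStart, lEnd, lUnlessStart, lUnlessEnd):
--     lReturnStart = []
--     lReturnEnd = []
--     for iStart, iEnd in zip(lStart, lEnd):
--         if not indexes_between_indexes(iStart, iEnd, lUnlessStart, lUnlessEnd):
--             lReturnStart.append(iStart)
--             lReturnEnd.append(iEnd)
--     return lReturnStart, lReturnEnd
--
-- def indexes_between_indexes(iStart, iEnd, lUnlessStart, lUnlessEnd):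
--     for iUnlessStart, iUnlessEnd in zip(lUnlessStart, lUnlessEnd):
--         if iUnlessStart < iStart < iUnlessEnd and \
--            iUnlessStart < iEnd < iUnlessEnd:
--             return True
--     return False
-- ===== SOURCE B (Python) =====
-- from bisect import bisect_left
--
--
-- def filter_token_pairs(lStart, lEnd, lUnlessStart, lUnlessEnd):
--     # Sort the unless-intervals by start and keep a running (prefix) maximum of
--     # their ends; a pair (s, e) is strictly contained in some interval iff some
--     # interval starts below min(s, e) and the best end among those exceeds max(s, e).
--     ivs = sorted(zip(lUnlessStart, lUnlessEnd), key=lambda t: t[0])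
--     starts = [t[0] for t in ivs]
--     pmax = []
--     cur = None
--     for t in ivs:
--         if cur is None or t[1] > cur:
--             cur = t[1]
--         pmax.append(cur)
--     lReturnStart = []
--     lReturnEnd = []
--     for s, e in zip(lStart, lEnd):
--         m = s if s < e else e
--         M = e if s < e else s
--         k = bisect_left(starts, m)
--         if k == 0 or pmax[k - 1] <= M:
--             lReturnStart.append(s)
--             lReturnEnd.append(e)
--     return lReturnStart, lReturnEnd
-- ===== Notes on version B (the rewrite author's own statement) =====
-- stated objective: faster
-- what changed: Instead of scanning all unless-intervals for every token pair (O(n*m)), B sorts the intervals by start once, builds a prefix-maximum of their ends, and answers each pair's containment query with one binary search: a pair (s,e) is strictly contained in some interval iff some start is below min(s,e) and the prefix-max end among those exceeds max(s,e).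
import Mathlib
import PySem

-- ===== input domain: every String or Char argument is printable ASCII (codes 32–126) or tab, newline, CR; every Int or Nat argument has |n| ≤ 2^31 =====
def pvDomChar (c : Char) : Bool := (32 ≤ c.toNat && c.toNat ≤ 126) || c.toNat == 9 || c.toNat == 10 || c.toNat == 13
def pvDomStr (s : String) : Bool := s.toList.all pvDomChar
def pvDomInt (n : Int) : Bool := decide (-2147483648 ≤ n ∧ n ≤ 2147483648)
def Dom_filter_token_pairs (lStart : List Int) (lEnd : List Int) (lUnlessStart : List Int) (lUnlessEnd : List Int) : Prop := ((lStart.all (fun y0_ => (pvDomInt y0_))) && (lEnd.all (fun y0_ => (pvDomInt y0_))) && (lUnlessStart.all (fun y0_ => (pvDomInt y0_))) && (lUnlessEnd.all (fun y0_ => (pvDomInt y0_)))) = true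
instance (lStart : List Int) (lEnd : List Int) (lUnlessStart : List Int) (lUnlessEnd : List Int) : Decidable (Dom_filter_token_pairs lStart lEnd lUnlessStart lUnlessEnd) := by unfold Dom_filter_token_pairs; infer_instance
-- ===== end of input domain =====

-- B replaces A's per-pair linear scan of the unless-intervals by sort + prefix-max + binary search (asymptotically faster).

-- ===== PORT A =====
-- helper indexes_between_indexes: loop over zip(lUnlessStart, lUnlessEnd), early return True
def pvIbi (iStart iEnd : Int) : List (Int × Int) → Bool
  | [] => false
  | p :: t =>
      if p.1 < iStart ∧ iStart < p.2 ∧ p.1 < iEnd ∧ iEnd < p.2 then true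
      else pvIbi iStart iEnd t

def indexes_between_indexes (iStart iEnd : Int) (lUnlessStart lUnlessEnd : List Int) : Bool :=
  pvIbi iStart iEnd (lUnlessStart.zip lUnlessEnd)

def filter_token_pairs (lStart : List Int) (lEnd : List Int) (lUnlessStart : List Int) (lUnlessEnd : List Int) : List Int × List Int :=
  (lStart.zip lEnd).foldl
    (fun acc p =>
      if indexes_between_indexes p.1 p.2 lUnlessStart lUnlessEnd then acc
      else (acc.1 ++ [p.1], acc.2 ++ [p.2])) ([], [])

-- ===== PORT B =====
-- one step of Source B's prefix-max loop (cur is None initially)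
def pvPmaxStep (acc : Option Int × List Int) (p : Int × Int) : Option Int × List Int :=
  let c := match acc.1 with
    | none => p.2
    | some c => if p.2 > c then p.2 else c
  (some c, acc.2 ++ [c])

def filter_token_pairs_alt (lStart : List Int) (lEnd : List Int) (lUnlessStart : List Int) (lUnlessEnd : List Int) : List Int × List Int :=
  let ivs := PySem.List.sorted (lUnlessStart.zip lUnlessEnd) (fun t => t.1)
  let starts := ivs.map (fun t => t.1)
  let pmax := (ivs.foldl pvPmaxStep (none, [])).2
  (lStart.zip lEnd).foldl
    (fun acc p =>
      let m := if p.1 < p.2 then p.1 else p.2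
      let M := if p.1 < p.2 then p.2 else p.1
      let k := PySem.List.bisectLeft starts m
      -- pmax[k-1]: only read when k ≠ 0, then k-1 < pmax.length, so getD is exact
      if k = 0 ∨ pmax.getD (k - 1) 0 ≤ M then (acc.1 ++ [p.1], acc.2 ++ [p.2])
      else acc) ([], [])

-- ===== PRECONDITION & SPEC =====
def Spec_filter_token_pairs (lStart : List Int) (lEnd : List Int) (lUnlessStart : List Int) (lUnlessEnd : List Int) (out : List Int × List Int) : Prop := out = filter_token_pairs_alt lStart lEnd lUnlessStart lUnlessEnd
instance (lStart : List Int) (lEnd : List Int) (lUnlessStart : List Int) (lUnlessEnd : List Int) (out : List Int × List Int) : Decidable (Spec_filter_token_pairs lStart lEnd lUnlessStart lUnlessEnd out) := by unfold Spec_filter_token_pairs; infer_instance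

-- ===== CLAIM (what is proved, stated in full; the proofs are below) =====
def Claim_equal_filter_token_pairs : Prop := ∀ (lStart : List Int) (lEnd : List Int) (lUnlessStart : List Int) (lUnlessEnd : List Int), Dom_filter_token_pairs lStart lEnd lUnlessStart lUnlessEnd → Spec_filter_token_pairs lStart lEnd lUnlessStart lUnlessEnd (filter_token_pairs lStart lEnd lUnlessStart lUnlessEnd)

-- ===== LEMMAS AND PROOFS =====

-- proof-side recursive description of the prefix-max list
def pvPmaxRec (c : Int) : List (Int × Int) → List Int
  | [] => []
  | p :: t => (if p.2 > c then p.2 else c) :: pvPmaxRec (if p.2 > c then p.2 else c) t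

-- running maximum of ends
def pvMaxE (l : List (Int × Int)) (c : Int) : Int :=
  l.foldl (fun c p => if p.2 > c then p.2 else c) c

theorem pvIbi_eq_true_iff (s e : Int) (L : List (Int × Int)) :
    pvIbi s e L = true ↔ ∃ p ∈ L, p.1 < s ∧ s < p.2 ∧ p.1 < e ∧ e < p.2 := by
  induction L with
  | nil => simp [pvIbi]
  | cons q t ih =>
      by_cases h : q.1 < s ∧ s < q.2 ∧ q.1 < e ∧ e < q.2
      · simp [pvIbi, h]
      · rw [pvIbi, if_neg h, ih]
        constructor
        · rintro ⟨p, hp, hc⟩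
          exact ⟨p, List.mem_cons_of_mem _ hp, hc⟩
        · rintro ⟨p, hp, hc⟩
          rcases List.mem_cons.1 hp with rfl | hp
          · exact absurd hc h
          · exact ⟨p, hp, hc⟩

theorem pvPmax_foldl (l : List (Int × Int)) : ∀ (c : Int) (pm : List Int),
    (l.foldl pvPmaxStep (some c, pm)).2 = pm ++ pvPmaxRec c l := by
  induction l with
  | nil => simp [pvPmaxRec]
  | cons q t ih =>
      intro c pm
      simp only [List.foldl_cons, pvPmaxStep, pvPmaxRec]
      rw [ih]
      simp

theorem pvPmax_cons (q : Int × Int) (t : List (Int × Int)) :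
    ((q :: t).foldl pvPmaxStep (none, [])).2 = q.2 :: pvPmaxRec q.2 t := by
  simp only [List.foldl_cons, pvPmaxStep]
  rw [pvPmax_foldl]
  simp

theorem pvPmaxRec_getD (t : List (Int × Int)) : ∀ (c : Int) (i : Nat), i < t.length →
    (pvPmaxRec c t).getD i 0 = pvMaxE (t.take (i + 1)) c := by
  induction t with
  | nil => intro c i h; simp at h
  | cons q t ih =>
      intro c i h
      cases i with
      | zero => simp [pvPmaxRec, pvMaxE]
      | succ i =>
          simp only [pvPmaxRec, List.getD_cons_succ, List.take_succ_cons]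
          rw [ih _ i (by simpa using h)]
          simp [pvMaxE]

theorem pvMaxE_lt (l : List (Int × Int)) : ∀ (c M : Int),
    M < pvMaxE l c ↔ M < c ∨ ∃ p ∈ l, M < p.2 := by
  induction l with
  | nil => intro c M; simp [pvMaxE]
  | cons q t ih =>
      intro c M
      simp only [pvMaxE, List.foldl_cons] at *
      rw [ih]
      constructor
      · rintro (h | ⟨p, hp, h2⟩)
        · split at h
          · exact Or.inr ⟨q, by simp, h⟩
          · exact Or.inl h
        · exact Or.inr ⟨p, List.mem_cons_of_mem _ hp, h2⟩
      · rintro (h | ⟨p, hp, h2⟩)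
        · left; split <;> omega
        · rcases List.mem_cons.1 hp with rfl | hp
          · left; split <;> omega
          · exact Or.inr ⟨p, hp, h2⟩

-- pmax[i] bounds the ends of the first i+1 sorted intervals exactly
theorem pvPmax_lt_iff (ivs : List (Int × Int)) (i : Nat) (hi : i < ivs.length) (M : Int) :
    M < ((ivs.foldl pvPmaxStep (none, [])).2).getD i 0 ↔ ∃ p ∈ ivs.take (i + 1), M < p.2 := by
  cases ivs with
  | nil => simp at hi
  | cons q t =>
      rw [pvPmax_cons]
      cases i with
      | zero => simp
      | succ i =>
          simp only [List.getD_cons_succ, List.take_succ_cons]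
          rw [pvPmaxRec_getD _ _ i (by simpa using hi), pvMaxE_lt]
          constructor
          · rintro (h | ⟨p, hp, h2⟩)
            · exact ⟨q, by simp, h⟩
            · exact ⟨p, by simp [hp], h2⟩
          · rintro ⟨p, hp, h2⟩
            rcases List.mem_cons.1 hp with rfl | hp
            · exact Or.inl h2
            · exact Or.inr ⟨p, hp, h2⟩

-- the core query equivalence: A's linear scan versus B's binary-search test
theorem pvQuery_eq (lus lue : List Int) (s e : Int) :
    (indexes_between_indexes s e lus lue) =
      (let ivs := PySem.List.sorted (lus.zip lue) (fun t => t.1)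
       let starts := ivs.map (fun t => t.1)
       let pmax := (ivs.foldl pvPmaxStep (none, [])).2
       let m := if s < e then s else e
       let M := if s < e then e else s
       let k := PySem.List.bisectLeft starts m
       ¬(k = 0 ∨ pmax.getD (k - 1) 0 ≤ M) : Bool) := by
  simp only [indexes_between_indexes]
  set ivs := PySem.List.sorted (lus.zip lue) (fun t => t.1) with hivs
  set starts := ivs.map (fun t => t.1) with hstarts
  set pmax := (ivs.foldl pvPmaxStep (none, [])).2 with hpmax
  set m := if s < e then s else e with hm
  set M := if s < e then e else s with hM
  set k := PySem.List.bisectLeft starts m with hk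
  have hsp : List.Pairwise (· ≤ ·) starts := by
    rw [hstarts, hivs]; exact PySem.List.sorted_map_key_pairwise _ _
  obtain ⟨hklen, hlt, hge⟩ := PySem.List.bisectLeft_spec starts m hsp
  have hslen : starts.length = ivs.length := by simp [hstarts]
  -- the exists characterisation of A's scan, transported to the sorted list
  have hA : pvIbi s e (lus.zip lue) = true ↔ ∃ p ∈ ivs, p.1 < m ∧ M < p.2 := by
    rw [pvIbi_eq_true_iff]
    constructor
    · rintro ⟨p, hp, h1, h2, h3, h4⟩
      exact ⟨p, (PySem.List.mem_sorted _ _ _ _).2 hp, by omega, by omega⟩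
    · rintro ⟨p, hp, h1, h2⟩
      exact ⟨p, (PySem.List.mem_sorted _ _ _ _).1 hp, by refine ⟨?_, ?_, ?_, ?_⟩ <;> omega⟩
  -- B's test equals the same exists
  have hB : (k ≠ 0 ∧ M < pmax.getD (k - 1) 0) ↔ ∃ p ∈ ivs, p.1 < m ∧ M < p.2 := by
    constructor
    · rintro ⟨hk0, hM⟩
      have hk1 : k - 1 < ivs.length := by omega
      rw [pvPmax_lt_iff ivs (k - 1) hk1 M] at hM
      rcases hM with ⟨p, hp, hp2⟩
      rw [List.mem_take_iff_getElem] at hp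
      rcases hp with ⟨j, hj, rfl⟩
      have hjk : j < k := by omega
      have hjlen : j < ivs.length := lt_of_lt_of_le hjk (hslen ▸ hklen)
      have := hlt j (by omega) hjk
      rw [List.getElem_map] at this
      exact ⟨ivs[j], List.getElem_mem _, this, hp2⟩
    · rintro ⟨p, hp, h1, h2⟩
      rw [List.mem_iff_getElem] at hp
      rcases hp with ⟨j, hjlen, rfl⟩
      have hjk : j < k := by
        by_contra hcon
        have := hge j (by omega) (by omega)
        rw [List.getElem_map] at this
        omega
      refine ⟨by omega, ?_⟩
      rw [pvPmax_lt_iff ivs (k - 1) (by omega) M]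
      refine ⟨ivs[j], ?_, h2⟩
      rw [List.mem_take_iff_getElem]
      exact ⟨j, by omega, rfl⟩
  cases h : pvIbi s e (lus.zip lue) with
  | false =>
      symm
      rw [decide_eq_false_iff_not, not_not]
      by_contra hcon
      push Not at hcon
      have hex := hB.1 ⟨hcon.1, by omega⟩
      rw [← hA] at hex
      simp [h] at hex
  | true =>
      symm
      rw [decide_eq_true_iff]
      have := hB.2 (hA.1 h)
      push Not
      exact ⟨this.1, by omega⟩

-- ===== VERDICT (by name: the statement is the Claim_ definition above) =====
theorem filter_token_pairs_spec : Claim_equal_filter_token_pairs := by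
  intro lStart lEnd lUnlessStart lUnlessEnd _
  unfold Spec_filter_token_pairs filter_token_pairs filter_token_pairs_alt
  congr 1
  funext acc p
  have hq := pvQuery_eq lUnlessStart lUnlessEnd p.1 p.2
  simp only at hq ⊢
  rw [hq, decide_not]
  cases hd : decide (PySem.List.bisectLeft ((PySem.List.sorted (lUnlessStart.zip lUnlessEnd) fun t => t.1).map fun t => t.1) (if p.1 < p.2 then p.1 else p.2) = 0 ∨ (((PySem.List.sorted (lUnlessStart.zip lUnlessEnd) fun t => t.1).foldl pvPmaxStep (none, [])).2.getD ((PySem.List.bisectLeft ((PySem.List.sorted (lUnlessStart.zip lUnlessEnd) fun t => t.1).map fun t => t.1) (if p.1 < p.2 then p.1 else p.2)) - 1) 0 ≤ (if p.1 < p.2 then p.2 else p.1)))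
  · have hP := of_decide_eq_false hd
    rw [if_neg hP]
    simp
  · have hP := of_decide_eq_true hd
    rw [if_pos hP]
    simp
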